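-- pv_equiv track=rewrite | github.com/noblesi/BalanceOps | src/balanceops/registry/promote_cli.py | _pick_model_path
-- ===== SOURCE A (Python) =====
-- def _pick_model_path(artifacts: list[dict]) -> str | None:
--     # train_dummy가 쓰는 kind 우선
--     preferred = ["model_candidate", "model_current", "model"]
--     for k in preferred:
--         for a in artifacts:
--             if str(a.get("kind")) == k and a.get("path"):
--                 return str(a["path"])
--     # 그래도 없으면 첫 번째 artifact라도
--     if artifacts:
--         p = artifacts[0].get("path")
--         return str(p) if p else None
--     return None
-- ===== SOURCE B (Python) =====
-- def _pick_model_path(artifacts: list[dict]) -> str | None: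
--     # One pass: index first truthy-path artifact per kind, then keyed lookups.
--     index = {}
--     for a in artifacts:
--         if a.get("path"):
--             index.setdefault(str(a.get("kind")), str(a["path"]))
--     for k in ["model_candidate", "model_current", "model"]:
--         if k in index:
--             return index[k]
--     if artifacts:
--         p = artifacts[0].get("path")
--         return str(p) if p else None
--     return None
-- ===== Notes on version B (the rewrite author's own statement) =====
-- stated objective: idiomatic
-- what changed: Replaces three repeated scans of the artifact list (one per preferred kind) by a single pass that builds a first-occurrence-per-kind dict index followed by keyed lookups.
import Mathlib
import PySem

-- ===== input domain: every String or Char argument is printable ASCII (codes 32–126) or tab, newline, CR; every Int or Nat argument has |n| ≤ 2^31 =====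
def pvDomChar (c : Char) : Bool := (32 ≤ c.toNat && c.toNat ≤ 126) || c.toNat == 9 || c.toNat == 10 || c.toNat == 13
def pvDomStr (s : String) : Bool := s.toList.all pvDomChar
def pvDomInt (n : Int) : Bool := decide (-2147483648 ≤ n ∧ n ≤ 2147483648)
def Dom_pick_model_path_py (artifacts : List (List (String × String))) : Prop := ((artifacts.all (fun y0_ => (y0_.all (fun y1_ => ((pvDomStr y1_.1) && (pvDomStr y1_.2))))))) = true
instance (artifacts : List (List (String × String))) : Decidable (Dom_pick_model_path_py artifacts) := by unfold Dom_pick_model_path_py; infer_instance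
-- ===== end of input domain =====

-- B builds a first-occurrence-per-kind index in one pass instead of A's scan per preferred kind;
-- objective: idiomatic (the proof is about the return value only; neither side mutates its argument).

-- ===== PORT A =====

-- a.get(k) on a dict given as an association list: first match (exact per the type convention)
def pvAget (a : List (String × String)) (k : String) : Option String :=
  (a.find? (fun p => p.1 == k)).map (·.2)

-- str(a.get("kind")): the value itself if present, "None" for a missing key
def pvAKind (a : List (String × String)) : String :=
  match pvAget a "kind" with
  | some v => v
  | none => "None"

-- truthiness of a.get("path"): present and non-empty
def pvATruthy (a : List (String × String)) : Bool :=
  match pvAget a "path" with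
  | some s => !(s == "")
  | none => false

-- inner 'for a in artifacts' loop for a fixed preferred kind k
def pvAScan (k : String) : List (List (String × String)) → Option String
  | [] => none
  | a :: rest =>
    if pvAKind a == k && pvATruthy a then
      pvAget a "path"   -- str(a["path"]); the key exists because the guard held
    else pvAScan k rest

-- final fallback: first artifact's path if truthy, else None
def pvAFallback (artifacts : List (List (String × String))) : Option String :=
  match artifacts with
  | [] => none
  | a0 :: _ =>
    match pvAget a0 "path" with
    | some p => if p == "" then none else some p
    | none => none

-- outer 'for k in preferred' loop
def pvAOuter (artifacts : List (List (String × String))) : List String → Option String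
  | [] => pvAFallback artifacts
  | k :: ks =>
    match pvAScan k artifacts with
    | some r => some r
    | none => pvAOuter artifacts ks

def pick_model_path_py (artifacts : List (List (String × String))) : Option String :=
  pvAOuter artifacts ["model_candidate", "model_current", "model"]

-- ===== PORT B =====

def pvBget (a : List (String × String)) (k : String) : Option String :=
  (a.find? (fun p => p.1 == k)).map (·.2)

def pvBKind (a : List (String × String)) : String :=
  match pvBget a "kind" with
  | some v => v
  | none => "None"

def pvBTruthy (a : List (String × String)) : Bool :=
  match pvBget a "path" with
  | some s => !(s == "")
  | none => false

-- index.setdefault(k, v) used for its side effect: insert only if the key is absent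
def pvBStep (d : PySem.Dict String String) (a : List (String × String)) : PySem.Dict String String :=
  if pvBTruthy a then
    if (d.get? (pvBKind a)).isSome then d
    else d.insert (pvBKind a) ((pvBget a "path").getD "")
  else d

def pvBIndex (artifacts : List (List (String × String))) : PySem.Dict String String :=
  artifacts.foldl pvBStep PySem.Dict.empty

-- 'for k in [...]: if k in index: return index[k]'
def pvBLookup (d : PySem.Dict String String) : List String → Option String
  | [] => none
  | k :: ks =>
    match d.get? k with
    | some v => some v
    | none => pvBLookup d ks

def pvBFallback (artifacts : List (List (String × String))) : Option String :=
  match artifacts with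
  | [] => none
  | a0 :: _ =>
    match pvBget a0 "path" with
    | some p => if p == "" then none else some p
    | none => none

def pick_model_path_py_alt (artifacts : List (List (String × String))) : Option String :=
  let idx := pvBIndex artifacts
  match pvBLookup idx ["model_candidate", "model_current", "model"] with
  | some v => some v
  | none => pvBFallback artifacts

-- ===== PRECONDITION & SPEC =====
def Spec_pick_model_path_py (artifacts : List (List (String × String))) (out : Option String) : Prop := out = pick_model_path_py_alt artifacts
instance (artifacts : List (List (String × String))) (out : Option String) : Decidable (Spec_pick_model_path_py artifacts out) := by unfold Spec_pick_model_path_py; infer_instance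

-- ===== CLAIM (what is proved, stated in full; the proofs are below) =====
def Claim_equal_pick_model_path_py : Prop := ∀ (artifacts : List (List (String × String))), Dom_pick_model_path_py artifacts → Spec_pick_model_path_py artifacts (pick_model_path_py artifacts)

-- ===== LEMMAS AND PROOFS =====

-- The index lookup for k is exactly A's scan for k (first truthy-path artifact of kind k).
theorem pvBIndex_get (k : String) (arts : List (List (String × String))) (d : PySem.Dict String String) :
    (arts.foldl pvBStep d).get? k =
      (match d.get? k with
       | some v => some v
       | none => pvAScan k arts) := by
  induction arts generalizing d with
  | nil => cases h : d.get? k <;> simp [pvAScan, h]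
  | cons a rest ih =>
    simp only [List.foldl_cons, ih, pvBStep, pvAScan]
    by_cases ht : pvBTruthy a
    · simp only [ht, if_true]
      have hk : pvAKind a = pvBKind a := rfl
      have hTr : pvATruthy a = pvBTruthy a := rfl
      by_cases hke : pvAKind a == k
      · -- this artifact has kind k
        have hkeq : pvBKind a = k := by
          rw [← hk]; exact (beq_iff_eq).mp hke
        simp only [hke, hTr, ht, Bool.and_self, if_true]
        cases hd : d.get? k with
        | some v => simp [hd, hkeq]
        | none =>
          simp only [hd]
          rw [hkeq]
          simp only [hd, Option.isSome_none, Bool.false_eq_true, if_false]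
          rw [PySem.Dict.get?_insert_self]
          -- pvAget a "path" is some (since truthy), and getD "" recovers it
          cases hp : pvBget a "path" with
          | some s =>
            rw [show pvAget a "path" = pvBget a "path" from rfl, hp]
            rfl
          | none => simp [pvBTruthy, hp] at ht
      · -- different kind: guard false on A's side; insert (if any) is at another key
        have hne : k ≠ pvBKind a := by
          intro h; apply hke; rw [← hk] at h; simp [h]
        by_cases hs : (d.get? (pvBKind a)).isSome
        · simp [hke, hs]
        · have hg : (d.insert (pvBKind a) ((pvBget a "path").getD "")).get? k = d.get? k := by
            rw [PySem.Dict.get?_insert]; simp [hne]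
          simp [hke, hs, hg]
    · simp [show pvATruthy a = pvBTruthy a from rfl, ht]

-- B's keyed lookup over a list of kinds equals A's outer loop, given the same fallback.
theorem pvOuter_eq (arts : List (List (String × String))) (ks : List String) :
    pvAOuter arts ks =
      (match pvBLookup (pvBIndex arts) ks with
       | some v => some v
       | none => pvBFallback arts) := by
  induction ks with
  | nil => simp [pvAOuter, pvBLookup, pvAFallback, pvBFallback, pvAget, pvBget]
  | cons k ks ih =>
    simp only [pvAOuter, pvBLookup]
    have h := pvBIndex_get k arts PySem.Dict.empty
    simp only [PySem.Dict.get?_empty] at h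
    rw [show (pvBIndex arts).get? k = pvAScan k arts from h]
    cases pvAScan k arts with
    | some v => rfl
    | none => exact ih

-- ===== VERDICT (by name: the statement is the Claim_ definition above) =====
theorem pick_model_path_py_spec : Claim_equal_pick_model_path_py := by
  intro artifacts _
  unfold Spec_pick_model_path_py pick_model_path_py pick_model_path_py_alt
  exact pvOuter_eq artifacts _
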